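-- pv_equiv track=rewrite | github.com/Abedalkareem/data-structures-and-algorithms | smallest_positive.py | smallest_positive
-- ===== SOURCE A (Python) =====
-- def smallest_positive(in_list):
--     x = None
--
--     for item in in_list:
--         if item <= 0:
--             continue
--
--         if x == None or item < x:
--             x = item
--
--     return x
-- ===== SOURCE B (Python) =====
-- def smallest_positive(in_list):
--     for item in sorted(in_list):
--         if item > 0:
--             return item
--     return None
-- ===== Notes on version B (the rewrite author's own statement) =====
-- stated objective: alternative
-- what changed: Replaced the running-minimum scan over an Option accumulator by sorting a copy of the list and returning the first element strictly greater than 0.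
import Mathlib
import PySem

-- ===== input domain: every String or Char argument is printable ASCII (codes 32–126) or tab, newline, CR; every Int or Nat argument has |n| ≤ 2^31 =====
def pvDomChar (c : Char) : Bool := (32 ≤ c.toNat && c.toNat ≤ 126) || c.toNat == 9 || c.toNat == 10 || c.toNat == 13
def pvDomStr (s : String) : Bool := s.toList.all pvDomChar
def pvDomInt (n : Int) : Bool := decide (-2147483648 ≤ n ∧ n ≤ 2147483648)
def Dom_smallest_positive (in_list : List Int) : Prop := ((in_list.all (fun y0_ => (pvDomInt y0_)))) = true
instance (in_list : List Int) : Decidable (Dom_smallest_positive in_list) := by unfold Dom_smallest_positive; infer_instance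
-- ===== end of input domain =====

-- B replaces A's running-minimum scan by sort-then-first-positive; objective: alternative (not faster).

-- ===== PORT A =====
-- running-minimum loop: skip item ≤ 0; replace x when x is None or item < x
def smallest_positive (in_list : List Int) : Option Int :=
  in_list.foldl
    (fun x item =>
      if item ≤ 0 then x
      else
        match x with
        | none => some item
        | some v => if item < v then some item else some v)
    none

-- ===== PORT B =====
-- sorted(in_list), then the first element > 0 (find? = the for-loop's early return)
def smallest_positive_alt (in_list : List Int) : Option Int :=
  (PySem.List.sorted in_list (fun x => x) false).find? (fun item => decide (0 < item))

-- ===== PRECONDITION & SPEC =====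
def Spec_smallest_positive (in_list : List Int) (out : Option Int) : Prop := out = smallest_positive_alt in_list
instance (in_list : List Int) (out : Option Int) : Decidable (Spec_smallest_positive in_list out) := by unfold Spec_smallest_positive; infer_instance

-- ===== CLAIM (what is proved, stated in full; the proofs are below) =====
def Claim_equal_smallest_positive : Prop := ∀ (in_list : List Int), Dom_smallest_positive in_list → Spec_smallest_positive in_list (smallest_positive in_list)

-- ===== LEMMAS AND PROOFS =====

-- min? is invariant under permutation
theorem pv_min?_perm {xs ys : List Int} (h : xs.Perm ys) : xs.min? = ys.min? := by
  cases hx : xs.min? with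
  | none =>
    rw [List.min?_eq_none_iff] at hx
    subst hx
    have hy : ys = [] := h.symm.eq_nil
    subst hy
    rfl
  | some a =>
    rw [List.min?_eq_some_iff_subtype] at hx
    symm
    rw [List.min?_eq_some_iff_subtype]
    exact ⟨h.mem_iff.mp hx.1, fun b hb => hx.2 b (h.mem_iff.mpr hb)⟩

-- head? of a ≤-sorted list is its min?
theorem pv_head?_eq_min? {l : List Int} (h : l.Pairwise (· ≤ ·)) : l.head? = l.min? := by
  cases l with
  | nil => rfl
  | cons a t =>
    rw [List.head?_cons]
    symm
    rw [List.min?_eq_some_iff_subtype]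
    rcases List.pairwise_cons.mp h with ⟨ha, _⟩
    exact ⟨List.mem_cons_self, by
      intro b hb
      rcases List.mem_cons.mp hb with rfl | hb
      · exact le_refl b
      · exact ha b hb⟩

-- A's loop computes min? of the positive elements
theorem pv_A_loop (xs : List Int) : ∀ acc : Option Int,
    xs.foldl
      (fun x item =>
        if item ≤ 0 then x
        else
          match x with
          | none => some item
          | some v => if item < v then some item else some v)
      acc
    = (match acc with
       | none => (xs.filter (fun i => decide (0 < i))).min?
       | some v => some (((xs.filter (fun i => decide (0 < i))).min?).elim v (min v))) := by
  induction xs with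
  | nil => intro acc; cases acc <;> rfl
  | cons a t ih =>
    intro acc
    by_cases ha : a ≤ 0
    · simp only [List.foldl_cons, if_pos ha, List.filter_cons]
      have : ¬ (0 < a) := by omega
      simp [this, ih acc]
    · have h0 : 0 < a := by omega
      simp only [List.foldl_cons, if_neg ha, List.filter_cons]
      cases acc with
      | none =>
        simp only [h0, decide_true, if_true]
        rw [ih (some a), List.min?_cons]
      | some v =>
        simp only [h0, decide_true, if_true]
        by_cases hav : a < v
        · rw [if_pos hav, ih (some a), List.min?_cons]
          cases ht : (t.filter (fun i => decide (0 < i))).min? with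
          | none => simp; omega
          | some m => simp; omega
        · rw [if_neg hav, ih (some v), List.min?_cons]
          cases ht : (t.filter (fun i => decide (0 < i))).min? with
          | none => simp; omega
          | some m => simp; omega

theorem pv_A_eq (xs : List Int) :
    smallest_positive xs = (xs.filter (fun i => decide (0 < i))).min? := by
  simpa using pv_A_loop xs none

theorem pv_B_eq (xs : List Int) :
    smallest_positive_alt xs = (xs.filter (fun i => decide (0 < i))).min? := by
  unfold smallest_positive_alt
  rw [← List.head?_filter]
  set s := PySem.List.sorted xs (fun x => x) false with hs
  have hpair : (s.filter (fun i => decide (0 < i))).Pairwise (· ≤ ·) := by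
    have := PySem.List.sorted_pairwise (α := Int) xs (fun x => x)
    exact List.Pairwise.filter _ this
  rw [pv_head?_eq_min? hpair]
  exact pv_min?_perm ((PySem.List.sorted_perm xs (fun x => x) false).filter _)

-- ===== VERDICT (by name: the statement is the Claim_ definition above) =====
theorem smallest_positive_spec : Claim_equal_smallest_positive := by
  intro xs _
  unfold Spec_smallest_positive
  rw [pv_A_eq, pv_B_eq]
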